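-- pv_equiv track=rewrite | github.com/capalmer1013/arduino-poetry | main.py | trimGraph
-- ===== SOURCE A (Python) =====
-- START_TAG = "START"
--
-- END_TAG = "END"
--
-- def trimGraph(g):
--     keycount = [x for xs in [list(g[x].keys()) for x in g] for x in xs]
--     incommingOccuranceDict = {x: keycount.count(x) for x in g}
--     # pp.pprint(incommingOccuranceDict)
--     for key in incommingOccuranceDict:
--         if incommingOccuranceDict[key] < 4   and key != END_TAG and key != START_TAG:
--             g.pop(key, None)
--             for each in g:
--                 g[each].pop(key, None)
--     return g
-- ===== SOURCE B (Python) =====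
-- START_TAG = "START"
--
-- END_TAG = "END"
--
-- def trimGraph(g):
--     # Sort the flattened adjacency-key list and scan it run by run: a node is
--     # "popular" iff its run has length >= 4 (sort-then-scan instead of counting).
--     flat = sorted(t for adj in g.values() for t in adj)
--     popular = set()
--     n = len(flat)
--     i = 0
--     while i < n:
--         j = i
--         while j < n and flat[j] == flat[i]:
--             j += 1
--         if j - i >= 4:
--             popular.add(flat[i])
--         i = j
--     doomed = {k for k in g if k not in popular and k != START_TAG and k != END_TAG}
--     for k in doomed:
--         del g[k]
--     for k in g:
--         g[k] = {t: w for t, w in g[k].items() if t not in doomed}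
--     return g
-- ===== Notes on version B (the rewrite author's own statement) =====
-- stated objective: faster
-- what changed: A recounts the flattened adjacency-key list once per node (list.count) and rescans every node's adjacency once per removed key; B never counts: it sorts the flattened key list once and scans it run by run, keeping nodes whose run is at least 4 long, then deletes the doomed nodes and filters each surviving adjacency in a single pass.
import Mathlib
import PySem

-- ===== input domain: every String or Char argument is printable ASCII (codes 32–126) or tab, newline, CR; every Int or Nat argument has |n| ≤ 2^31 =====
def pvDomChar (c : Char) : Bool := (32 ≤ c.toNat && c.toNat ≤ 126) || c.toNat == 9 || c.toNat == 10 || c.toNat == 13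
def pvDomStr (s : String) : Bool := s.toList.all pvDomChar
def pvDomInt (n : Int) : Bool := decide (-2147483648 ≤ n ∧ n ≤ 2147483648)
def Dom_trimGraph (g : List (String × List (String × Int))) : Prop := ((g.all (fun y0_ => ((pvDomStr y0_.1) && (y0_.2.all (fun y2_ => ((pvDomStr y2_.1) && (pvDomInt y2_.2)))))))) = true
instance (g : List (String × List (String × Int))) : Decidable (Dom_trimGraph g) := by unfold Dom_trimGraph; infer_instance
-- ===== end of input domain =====

-- B replaces A's per-node recount of the flattened key list (list.count per node) and its
-- per-removed-key rescan of every node by a sort of the flattened key list, a run-length scan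
-- of the sorted list, and one filtering pass per surviving node (faster; B mutates g like A).

-- boundary: the Python argument is a dict of dicts; both ports receive it through the
-- same Python-dict construction (last duplicate wins, first position kept)
def pvToDict (g : List (String × List (String × Int))) : PySem.Dict String (PySem.Dict String Int) :=
  PySem.Dict.ofList (g.map (fun p => (p.1, PySem.Dict.ofList p.2)))

-- ===== PORT A =====
def trimGraph (g : List (String × List (String × Int))) : List (String × List (String × Int)) :=
  let gd := pvToDict g
  -- keycount = [x for xs in [list(g[x].keys()) for x in g] for x in xs]
  let keycount : List String := (gd.keys.map (fun x => (gd.getD x PySem.Dict.empty).keys)).flatten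
  -- incommingOccuranceDict = {x: keycount.count(x) for x in g}
  let occ : PySem.Dict String Int :=
    gd.keys.foldl (fun d x => d.insert x ((keycount.count x : Int))) PySem.Dict.empty
  -- for key in incommingOccuranceDict: if …: g.pop(key); for each in g: g[each].pop(key)
  -- (the inner 'for each in g' loop pops key from every remaining node's adjacency: rendered
  --  as the value-wise update of each entry of the dict after g.pop(key))
  let final := occ.keys.foldl (fun d key =>
      if occ.getD key 0 < 4 ∧ key ≠ "END" ∧ key ≠ "START" then
        PySem.Dict.mk (((d.erase key).items).map (fun p => (p.1, p.2.erase key)))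
      else d) gd
  final.items.map (fun p => (p.1, p.2.items))

-- ===== PORT B =====
-- the outer while loop of Source B: step to the end of the current run (the inner while = takeWhile/
-- dropWhile split), add the run's element to the set when the run is at least 4 long, continue
def pvRunScan (l : List String) (s : PySem.Set String) : PySem.Set String :=
  match l with
  | [] => s
  | x :: xs =>
    let run := xs.takeWhile (fun t => t == x)
    let rest := xs.dropWhile (fun t => t == x)
    pvRunScan rest (if 4 ≤ run.length + 1 then PySem.Set.add s x else s)
termination_by l.length
decreasing_by
  have := List.length_dropWhile_le (fun t => t == x) xs
  simp only [List.length_cons]; omega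

def trimGraph_alt (g : List (String × List (String × Int))) : List (String × List (String × Int)) :=
  let gd := pvToDict g
  -- flat = sorted(t for adj in g.values() for t in adj)
  let flat : List String := PySem.List.sorted ((gd.values.map (fun adj => adj.keys)).flatten) (fun x => x) false
  -- popular = set(); while i < n: … (run scan)
  let popular : PySem.Set String := pvRunScan flat PySem.Set.empty
  -- doomed = {k for k in g if k not in popular and k != START_TAG and k != END_TAG}
  let doomed : PySem.Set String :=
    PySem.Set.ofList (gd.keys.filter (fun k => !(PySem.Set.contains popular k) && k != "START" && k != "END"))
  -- for k in doomed: del g[k]   (erases commute, so the set's order is immaterial)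
  let g1 := doomed.foldl (fun d k => d.erase k) gd
  -- for k in g: g[k] = {t: w for t, w in g[k].items() if t not in doomed}
  g1.items.map (fun p => (p.1, p.2.items.filter (fun q => !(PySem.Set.contains doomed q.1))))

-- ===== PRECONDITION & SPEC =====
def Spec_trimGraph (g : List (String × List (String × Int))) (out : List (String × List (String × Int))) : Prop := out = trimGraph_alt g
instance (g : List (String × List (String × Int))) (out : List (String × List (String × Int))) : Decidable (Spec_trimGraph g out) := by unfold Spec_trimGraph; infer_instance

-- ===== CLAIM (what is proved, stated in full; the proofs are below) =====
def Claim_equal_trimGraph : Prop := ∀ (g : List (String × List (String × Int))), Dom_trimGraph g → Spec_trimGraph g (trimGraph g)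

-- ===== LEMMAS AND PROOFS =====

-- on a list in which equal elements are contiguous (here: a ≤-sorted list), the run scan
-- collects exactly the elements of multiplicity ≥ 4
theorem pv_mem_runScan (l : List String) (hs : l.Pairwise (· ≤ ·)) (s : PySem.Set String) (t : String) :
    t ∈ pvRunScan l s ↔ t ∈ s ∨ 4 ≤ l.count t := by
  induction hl : l.length using Nat.strong_induction_on generalizing l s with
  | _ n ih =>
  cases l with
  | nil => simp [pvRunScan]
  | cons x xs =>
    rw [pvRunScan]
    set run := xs.takeWhile (fun t => t == x) with hrun
    set rest := xs.dropWhile (fun t => t == x) with hrest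
    have hsplit : run ++ rest = xs := List.takeWhile_append_dropWhile
    have hrestlen : rest.length ≤ xs.length := by
      have := List.length_dropWhile_le (fun t => t == x) xs
      omega
    have hrest_sorted : rest.Pairwise (· ≤ ·) := by
      have hxs : xs.Pairwise (· ≤ ·) := (List.pairwise_cons.mp hs).2
      have : rest.Sublist xs := hrest ▸ List.dropWhile_sublist _
      exact hxs.sublist this
    -- x does not occur in rest
    have hxrest : x ∉ rest := by
      intro hx
      cases hr : rest with
      | nil => simp [hr] at hx
      | cons y ys =>
        have hy : (y == x) = false := by
          have h5 := List.head?_dropWhile_not (fun t => t == x) xs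
          rw [← hrest, hr] at h5
          simpa using h5
        have hyx : y ≠ x := by simpa using hy
        have hyinxs : y ∈ xs := by
          have : y ∈ rest := by simp [hr]
          exact (hsplit ▸ List.mem_append.mpr (Or.inr this))
        have hxy : x ≤ y := (List.pairwise_cons.mp hs).1 y hyinxs
        have hylex : y ≤ x := by
          rcases List.mem_cons.mp (hr ▸ hx : x ∈ y :: ys) with h | h
          · exact le_of_eq h.symm
          · exact (List.pairwise_cons.mp (hr ▸ hrest_sorted)).1 x h
        exact hyx (le_antisymm hylex hxy)
    have hrunx : ∀ z ∈ run, z = x := by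
      intro z hz
      have := List.mem_takeWhile_imp (hrun ▸ hz)
      simpa using this
    have ihr := ih rest.length (by rw [← hl, List.length_cons]; omega) rest hrest_sorted
      (if 4 ≤ run.length + 1 then PySem.Set.add s x else s) rfl
    rw [ihr]
    have hcount : (x :: xs).count t = (if t = x then run.length + 1 else 0) + rest.count t := by
      rw [List.count_cons, ← hsplit, List.count_append]
      by_cases htx : t = x
      · subst htx
        have h1 : run.count t = run.length := by
          rw [List.count_eq_length]; intro z hz; simp [hrunx z hz]
        have h2 : rest.count t = 0 := by
          rw [List.count_eq_zero]; exact hxrest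
        simp [h1, h2]
      · have h1 : run.count t = 0 := by
          rw [List.count_eq_zero]; intro hmem; exact htx (hrunx t hmem)
        have hxt : (x == t) = false := by
          rw [beq_eq_false_iff_ne]; exact fun h => htx h.symm
        simp [h1, hxt, htx]
    by_cases htx : t = x
    · subst htx
      have h2 : rest.count t = 0 := by rw [List.count_eq_zero]; exact hxrest
      rw [hcount]; simp only [h2, Nat.add_zero]
      by_cases h4 : 4 ≤ run.length + 1
      · simp only [if_pos h4, PySem.Set.mem_add]
        constructor
        · rintro (⟨h | h⟩ | h)
          · exact Or.inl h
          · exact Or.inr h4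
          · omega
        · rintro (h | h)
          · exact Or.inl (Or.inl h)
          · exact Or.inl (Or.inr trivial)
      · simp only [if_neg h4]
        constructor
        · rintro (h | h)
          · exact Or.inl h
          · omega
        · rintro (h | h)
          · exact Or.inl h
          · exact absurd h h4
    · rw [hcount]; simp only [if_neg htx, Nat.zero_add]
      by_cases h4 : 4 ≤ run.length + 1
      · simp only [if_pos h4, PySem.Set.mem_add]
        constructor
        · rintro (⟨h | h⟩ | h)
          · exact Or.inl h
          · exact absurd h htx
          · exact Or.inr h
        · rintro (h | h)
          · exact Or.inl (Or.inl h)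
          · exact Or.inr h
      · rw [if_neg h4]

-- erasing keys commutes with a value-wise map of the dict
theorem pv_eraseFold_mapVal (R : List String) (d : PySem.Dict String (PySem.Dict String Int))
    (f : PySem.Dict String Int → PySem.Dict String Int) :
    (R.foldl (fun d k => d.erase k) (PySem.Dict.mk (d.items.map (fun p => (p.1, f p.2))))).items
      = (R.foldl (fun d k => d.erase k) d).items.map (fun p => (p.1, f p.2)) := by
  induction R generalizing d with
  | nil => rfl
  | cons k R ih =>
    have h : (PySem.Dict.mk (d.items.map (fun p => (p.1, f p.2)))).erase k
        = PySem.Dict.mk ((d.erase k).items.map (fun p => (p.1, f p.2))) := by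
      simp [PySem.Dict.erase, List.filter_map, Function.comp_def]
    simp only [List.foldl_cons, h]
    exact ih (d.erase k)

-- A's conditional global-erase loop, at the output level, is: erase the selected keys from the
-- outer dict, and filter every inner item list by non-membership in the selected keys
theorem pv_foldA_eq (c : String → Bool) (ks : List String)
    (d : PySem.Dict String (PySem.Dict String Int)) :
    (ks.foldl (fun d key =>
        if c key then
          PySem.Dict.mk (((d.erase key).items).map (fun p => (p.1, p.2.erase key)))
        else d) d).items.map (fun p => (p.1, p.2.items))
      = ((ks.filter c).foldl (fun d k => d.erase k) d).items.map
          (fun p => (p.1, p.2.items.filter (fun q => !((ks.filter c).contains q.1)))) := by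
  induction ks generalizing d with
  | nil => simp
  | cons key ks ih =>
    by_cases hc : c key
    · simp only [List.foldl_cons, List.filter_cons, hc, if_pos]
      rw [ih (PySem.Dict.mk (((d.erase key).items).map (fun p => (p.1, p.2.erase key))))]
      have h := pv_eraseFold_mapVal (ks.filter c) (d.erase key) (fun v => v.erase key)
      simp only [h, List.map_map]
      apply List.map_congr_left
      intro p _
      simp only [Function.comp_def, PySem.Dict.erase, List.filter_filter]
      apply congrArg
      apply List.filter_congr
      intro q _
      by_cases hq : q.1 = key <;> simp [hq, Bool.and_comm]
    · simp only [List.foldl_cons, List.filter_cons, hc, reduceIte, Bool.false_eq_true]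
      exact ih d

-- the two pipelines agree on any outer dict with distinct keys
theorem pv_main (gd : PySem.Dict String (PySem.Dict String Int)) (hnd : gd.keys.Nodup) :
    (let keycount : List String := (gd.keys.map (fun x => (gd.getD x PySem.Dict.empty).keys)).flatten
     let occ : PySem.Dict String Int :=
       gd.keys.foldl (fun d x => d.insert x ((keycount.count x : Int))) PySem.Dict.empty
     let final := occ.keys.foldl (fun d key =>
         if occ.getD key 0 < 4 ∧ key ≠ "END" ∧ key ≠ "START" then
           PySem.Dict.mk (((d.erase key).items).map (fun p => (p.1, p.2.erase key)))
         else d) gd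
     final.items.map (fun p => (p.1, p.2.items)))
    =
    (let flat : List String := PySem.List.sorted ((gd.values.map (fun adj => adj.keys)).flatten) (fun x => x) false
     let popular : PySem.Set String := pvRunScan flat PySem.Set.empty
     let doomed : PySem.Set String :=
       PySem.Set.ofList (gd.keys.filter (fun k => !(PySem.Set.contains popular k) && k != "START" && k != "END"))
     let g1 := doomed.foldl (fun d k => d.erase k) gd
     g1.items.map (fun p => (p.1, p.2.items.filter (fun q => !(PySem.Set.contains doomed q.1))))) := by
  simp only []
  set keycount : List String := (gd.keys.map (fun x => (gd.getD x PySem.Dict.empty).keys)).flatten with hkc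
  set flat : List String := PySem.List.sorted ((gd.values.map (fun adj => adj.keys)).flatten) (fun x => x) false with hflat
  set popular : PySem.Set String := pvRunScan flat PySem.Set.empty with hpop
  set occ : PySem.Dict String Int :=
    gd.keys.foldl (fun d x => d.insert x ((keycount.count x : Int))) PySem.Dict.empty with hocc
  set c : String → Bool := fun k => !(PySem.Set.contains popular k) && k != "START" && k != "END" with hc
  -- flat is a rearrangement of keycount
  have hval : gd.values = gd.keys.map (fun k => gd.getD k PySem.Dict.empty) :=
    PySem.Dict.values_eq_map_keys gd hnd _
  have hperm : flat.Perm keycount := by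
    rw [hflat, hkc, hval]
    simpa using PySem.List.sorted_perm ((gd.keys.map (fun k => gd.getD k PySem.Dict.empty)).map (fun adj => adj.keys)).flatten (fun x => x) false
  -- popular holds exactly the keys of multiplicity ≥ 4 in keycount
  have hpopmem : ∀ t, t ∈ popular ↔ 4 ≤ keycount.count t := by
    intro t
    rw [hpop, pv_mem_runScan flat (by simpa using PySem.List.sorted_pairwise ((gd.values.map (fun adj => adj.keys)).flatten) (fun x => x)) PySem.Set.empty t]
    rw [hperm.count_eq]
    simp [PySem.Set.empty]
  -- occ has keys gd.keys and looks up keycount counts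
  have hocckeys : occ.keys = gd.keys := by
    have h := PySem.Dict.keys_foldl_insert (ν := Int) gd.keys
      (fun _ x => ((keycount.count x : Int))) PySem.Dict.empty
    rw [hocc]
    calc occ.keys = PySem.Set.update PySem.Dict.empty.keys gd.keys := h
    _ = PySem.Set.ofList gd.keys := PySem.Set.update_nil_left gd.keys
    _ = gd.keys := PySem.Set.ofList_eq_self_of_nodup gd.keys hnd
  have hoccitems : occ.items = gd.keys.map (fun a => (a, (keycount.count a : Int))) := by
    have h := PySem.Dict.items_foldl_insert_fresh gd.keys (fun a => a)
      (fun a => ((keycount.count a : Int))) PySem.Dict.empty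
      (fun a _ => by simp [PySem.Dict.contains_empty]) (by simpa using hnd)
    simpa using h
  have hoccget : ∀ x ∈ gd.keys, occ.getD x 0 = (keycount.count x : Int) := by
    intro x hx
    refine PySem.Dict.getD_of_mem_items occ ?_ (hocckeys ▸ hnd) 0
    rw [hoccitems]
    exact List.mem_map.mpr ⟨x, hx, rfl⟩
  -- switch A's loop condition to c
  have hswitch : (occ.keys.foldl (fun d key =>
        if occ.getD key 0 < 4 ∧ key ≠ "END" ∧ key ≠ "START" then
          PySem.Dict.mk (((d.erase key).items).map (fun p => (p.1, p.2.erase key)))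
        else d) gd)
      = gd.keys.foldl (fun d key =>
        if c key then
          PySem.Dict.mk (((d.erase key).items).map (fun p => (p.1, p.2.erase key)))
        else d) gd := by
    rw [hocckeys]
    refine PySem.List.foldl_congr_mem gd.keys _ _ gd ?_
    intro acc x hx
    refine if_congr ?_ rfl rfl
    rw [hoccget x hx, hc]
    have hp := hpopmem x
    simp only [Bool.and_eq_true, bne_iff_ne, Bool.not_eq_true', ← Bool.not_eq_true,
      PySem.Set.contains_iff, hp]
    constructor
    · rintro ⟨h1, h2, h3⟩
      refine ⟨⟨fun h => ?_, h3⟩, h2⟩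
      have : (4 : Int) ≤ (keycount.count x : Int) := by exact_mod_cast h
      omega
    · rintro ⟨⟨h1, h3⟩, h2⟩
      refine ⟨?_, h2, h3⟩
      have : ¬ (4 : Int) ≤ (keycount.count x : Int) := by
        intro h; exact h1 (by exact_mod_cast h)
      omega
  have hrem : PySem.Set.ofList (gd.keys.filter c) = gd.keys.filter c :=
    PySem.Set.ofList_eq_self_of_nodup _ (hnd.filter c)
  rw [hswitch, pv_foldA_eq c gd.keys gd, hrem]
  rfl

-- ===== VERDICT (by name: the statement is the Claim_ definition above) =====
theorem trimGraph_spec : Claim_equal_trimGraph := by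
  intro g _
  show trimGraph g = trimGraph_alt g
  unfold trimGraph trimGraph_alt
  exact pv_main (pvToDict g) (PySem.Dict.nodup_keys_ofList _)
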